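-- pv_equiv track=rewrite | github.com/Saumya-ranjan/Mastering-Coding | DSA [450 Q] [60%]/Strings/Hard/to_check_string_rotation.py | func
-- ===== SOURCE A (Python) =====
-- def func(str1,str2):
--     arr = []
--     arr1 = []
--     str3 = str1+str1
--     for i in range(len(str3)+1):
--         for j in range(i+1,len(str3)+1):
--             arr.append(str3[i:j])
--     # if str2 in arr:
--     #     return True
--     # return False
--     for i in arr:
--         if len(i) == len(str1):
--             arr1.append(i)
--     return (arr1)
-- ===== SOURCE B (Python) =====
-- def func(str1, str2):
--     # All length-n windows of str1+str1, emitted directly by one sliding pass.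
--     if not str1:
--         return []
--     n = len(str1)
--     s = str1 + str1
--     return [s[i:i+n] for i in range(n + 1)]
-- ===== Notes on version B (the rewrite author's own statement) =====
-- stated objective: faster
-- what changed: B slides a single length-n window over str1+str1 (n+1 slices) instead of materialising all O(n^2) substrings and then filtering them by length.
import Mathlib
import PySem

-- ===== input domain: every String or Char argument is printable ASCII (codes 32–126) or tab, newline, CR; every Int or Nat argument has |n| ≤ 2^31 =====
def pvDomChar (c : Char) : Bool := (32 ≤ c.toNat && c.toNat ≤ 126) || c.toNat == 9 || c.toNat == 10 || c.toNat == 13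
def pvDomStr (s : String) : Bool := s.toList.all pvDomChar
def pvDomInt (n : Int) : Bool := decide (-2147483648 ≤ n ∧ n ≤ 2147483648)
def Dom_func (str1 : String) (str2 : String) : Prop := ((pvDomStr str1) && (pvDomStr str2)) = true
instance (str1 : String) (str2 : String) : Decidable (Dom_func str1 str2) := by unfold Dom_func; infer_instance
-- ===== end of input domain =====

-- B replaces A's enumeration of all substrings of str1+str1 followed by a length filter
-- with one direct sliding pass emitting the length-n windows (same values, same order).

-- ===== PORT A =====
-- strings are carried as List Char (PySem convention) and wrapped with String.ofList on return
def func (str1 : String) (_str2 : String) : List String :=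
  let str3 : List Char := str1.toList ++ str1.toList
  let arr : List (List Char) :=
    (PySem.List.pyRange 0 ((str3.length : Int) + 1) 1).foldl
      (fun arr i =>
        (PySem.List.pyRange (i + 1) ((str3.length : Int) + 1) 1).foldl
          (fun arr j => arr ++ [PySem.List.slice str3 (some i) (some j)]) arr)
      []
  let arr1 : List (List Char) :=
    arr.foldl (fun arr1 t => if t.length = str1.toList.length then arr1 ++ [t] else arr1) []
  arr1.map String.ofList

-- ===== PORT B =====
def func_alt (str1 : String) (_str2 : String) : List String :=
  let cs := str1.toList
  if cs.isEmpty then []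
  else
    let n := cs.length
    let s := cs ++ cs
    (PySem.List.pyRange 0 ((n : Int) + 1) 1).map
      (fun i => String.ofList (PySem.List.slice s (some i) (some (i + (n : Int)))))

-- ===== PRECONDITION & SPEC =====
def Spec_func (str1 : String) (str2 : String) (out : List String) : Prop := out = func_alt str1 str2
instance (str1 : String) (str2 : String) (out : List String) : Decidable (Spec_func str1 str2 out) := by unfold Spec_func; infer_instance

-- ===== CLAIM (what is proved, stated in full; the proofs are below) =====
def Claim_equal_func : Prop := ∀ (str1 : String) (str2 : String), Dom_func str1 str2 → Spec_func str1 str2 (func str1 str2)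

-- ===== LEMMAS AND PROOFS =====

-- A's arr-building loops, at the List Char level (proof-side restatement of A's body)
def pvArr (cs : List Char) : List (List Char) :=
  (PySem.List.pyRange 0 (((cs ++ cs).length : Int) + 1) 1).foldl
    (fun arr i =>
      (PySem.List.pyRange (i + 1) (((cs ++ cs).length : Int) + 1) 1).foldl
        (fun arr j => arr ++ [PySem.List.slice (cs ++ cs) (some i) (some j)]) arr)
    []

def pvArr1 (cs : List Char) : List (List Char) :=
  (pvArr cs).foldl (fun arr1 t => if t.length = cs.length then arr1 ++ [t] else arr1) []

lemma pv_func_eq (str1 str2 : String) :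
    func str1 str2 = (pvArr1 str1.toList).map String.ofList := rfl

lemma pv_flatMap_congr {α β : Type} (l : List α) (f g : α → List β)
    (h : ∀ x ∈ l, f x = g x) : l.flatMap f = l.flatMap g := by
  induction l with
  | nil => rfl
  | cons a t ih =>
      simp only [List.flatMap_cons]
      rw [h a (by simp), ih (fun x hx => h x (by simp [hx]))]

lemma pv_filter_eq_pyRange_aux (m : Nat) : ∀ (a c : Int),
    (PySem.List.pyRange a (a + (m : Int)) 1).filter (fun j => decide (j = c)) =
      if a ≤ c ∧ c < a + (m : Int) then [c] else [] := by
  induction m with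
  | zero =>
      intro a c
      rw [PySem.List.pyRange_one_eq_nil (by omega)]
      rw [if_neg (by omega)]
      rfl
  | succ k ih =>
      intro a c
      rw [PySem.List.pyRange_one_cons (by push_cast; omega)]
      have h1 : a + ((k + 1 : Nat) : Int) = (a + 1) + (k : Int) := by push_cast; ring
      rw [List.filter_cons, h1, ih (a + 1) c]
      by_cases hac : a = c
      · subst hac
        rw [decide_eq_true rfl,
          if_neg (show ¬(a + 1 ≤ a ∧ a < a + 1 + (k : Int)) by omega),
          if_pos (show a ≤ a ∧ a < a + 1 + (k : Int) by omega)]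
        rfl
      · rw [decide_eq_false hac]
        simp only [Bool.false_eq_true, if_false]
        by_cases h2 : a + 1 ≤ c ∧ c < a + 1 + (k : Int)
        · rw [if_pos h2, if_pos (by omega)]
        · rw [if_neg h2, if_neg (by omega)]

lemma pv_filter_eq_pyRange (a b c : Int) :
    (PySem.List.pyRange a b 1).filter (fun j => decide (j = c)) =
      if a ≤ c ∧ c < b then [c] else [] := by
  by_cases h : a ≤ b
  · have hb : b = a + (((b - a).toNat : Nat) : Int) := by omega
    rw [hb, pv_filter_eq_pyRange_aux]
  · rw [PySem.List.pyRange_one_eq_nil (by omega), if_neg (by omega)]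
    rfl

lemma pv_clampIdx (n : Nat) (i : Int) (h0 : 0 ≤ i) (h1 : i ≤ (n : Int)) :
    PySem.List.clampIdx n i = i.toNat := by
  simp only [PySem.List.clampIdx]
  rw [if_neg (by omega)]
  omega

-- the core list-level equality: A's filtered substring list IS the window list
lemma pv_core (cs : List Char) :
    pvArr1 cs =
      if cs.isEmpty then []
      else (PySem.List.pyRange 0 ((cs.length : Int) + 1) 1).map
        (fun i => PySem.List.slice (cs ++ cs) (some i) (some (i + (cs.length : Int)))) := by
  set n : Nat := cs.length with hn
  set s : List Char := cs ++ cs with hs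
  have hsl : s.length = n + n := by simp [hs, hn]
  -- 1. shape of the filter loop
  have hfil : (fun (arr1 : List (List Char)) (t : List Char) =>
      if t.length = cs.length then arr1 ++ [t] else arr1) =
      (fun arr1 t => if (decide (t.length = n)) = true then arr1 ++ [id t] else arr1) := by
    funext arr1 t
    by_cases h : t.length = n <;> simp [h, hn]
  -- 2. shape of the arr-building loops
  have harr : pvArr cs =
      (PySem.List.pyRange 0 ((s.length : Int) + 1) 1).flatMap
        (fun i => (PySem.List.pyRange (i + 1) ((s.length : Int) + 1) 1).map
          (fun j => PySem.List.slice s (some i) (some j))) := by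
    unfold pvArr
    rw [show (fun (arr : List (List Char)) (i : Int) =>
        (PySem.List.pyRange (i + 1) ((s.length : Int) + 1) 1).foldl
          (fun arr j => arr ++ [PySem.List.slice s (some i) (some j)]) arr) =
        (fun arr i => arr ++ (PySem.List.pyRange (i + 1) ((s.length : Int) + 1) 1).map
          (fun j => PySem.List.slice s (some i) (some j))) from
      funext fun arr => funext fun i => PySem.List.foldl_append_singleton_eq_map _ _ _]
    rw [PySem.List.foldl_append_eq_flatMap]
    rfl
  unfold pvArr1
  rw [hfil, PySem.List.foldl_append_if, List.nil_append, List.map_id, harr,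
    List.filter_flatMap]
  -- 3. each inner filtered list is a singleton window (or nothing)
  have hinner : ∀ i ∈ PySem.List.pyRange 0 ((s.length : Int) + 1) 1,
      ((PySem.List.pyRange (i + 1) ((s.length : Int) + 1) 1).map
        (fun j => PySem.List.slice s (some i) (some j))).filter (fun t => decide (t.length = n)) =
      if i + 1 ≤ i + (n : Int) ∧ i + (n : Int) < (s.length : Int) + 1
        then [PySem.List.slice s (some i) (some (i + (n : Int)))] else [] := by
    intro i hi
    rw [PySem.List.mem_pyRange_one] at hi
    rw [List.filter_map]
    rw [List.filter_congr (q := fun j => decide (j = i + (n : Int))) ?_]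
    · rw [pv_filter_eq_pyRange, apply_ite (List.map (fun j => PySem.List.slice s (some i) (some j)))]
      by_cases h : i + 1 ≤ i + (n : Int) ∧ i + (n : Int) < (s.length : Int) + 1
      · rw [if_pos h, if_pos h]; rfl
      · rw [if_neg h, if_neg h]; rfl
    · intro j hj
      rw [PySem.List.mem_pyRange_one] at hj
      simp only [Function.comp]
      rw [PySem.List.length_slice,
        pv_clampIdx s.length i (by omega) (by omega),
        pv_clampIdx s.length j (by omega) (by omega)]
      rw [decide_eq_decide]
      omega
  rw [pv_flatMap_congr _ _ _ hinner]
  -- 4. split on whether cs is empty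
  by_cases hcs : cs.isEmpty
  · have h0 : n = 0 := by simp [hn, List.isEmpty_iff.mp hcs]
    rw [if_pos hcs]
    rw [pv_flatMap_congr _ _ (fun _ => ([] : List (List Char)))
      (fun i _ => by rw [if_neg (by omega)])]
    simp
  · have h1 : 1 ≤ n := by
      rcases cs with _ | _
      · simp at hcs
      · simp [hn]
    rw [if_neg hcs]
    rw [PySem.List.pyRange_one_append 0 ((n : Int) + 1) ((s.length : Int) + 1)
      (by omega) (by omega), List.flatMap_append]
    rw [pv_flatMap_congr (PySem.List.pyRange 0 ((n : Int) + 1) 1) _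
      (fun i => [PySem.List.slice s (some i) (some (i + (n : Int)))])
      (fun i hi => by
        rw [PySem.List.mem_pyRange_one] at hi
        rw [if_pos (by omega)])]
    rw [pv_flatMap_congr (PySem.List.pyRange ((n : Int) + 1) ((s.length : Int) + 1) 1) _
      (fun _ => ([] : List (List Char)))
      (fun i hi => by
        rw [PySem.List.mem_pyRange_one] at hi
        rw [if_neg (by omega)])]
    rw [← List.map_eq_flatMap]
    simp

theorem pv_main (str1 str2 : String) : func str1 str2 = func_alt str1 str2 := by
  rw [pv_func_eq, pv_core]
  by_cases h : str1.toList.isEmpty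
  · simp [func_alt, h]
  · simp only [func_alt, h, Bool.false_eq_true, if_false, List.map_map]
    rfl

-- ===== VERDICT (by name: the statement is the Claim_ definition above) =====
theorem func_spec : Claim_equal_func := by
  intro str1 str2 _
  show func str1 str2 = func_alt str1 str2
  exact pv_main str1 str2
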